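-- pv_equiv track=rewrite | github.com/maxryvak/python-online-marathon | sprint-01/task-7.py | Cipher_Zeroes
-- ===== SOURCE A (Python) =====
-- def Cipher_Zeroes(N):
--     count = 0
--     N = [*N]
--     for i in N:
--         if i in ['0', '6', '9']:
--             count += 1
--         elif i == '8':
--             count += 2
--     if count > 0 and count % 2 == 1:
--         count += 1
--     elif count > 0 and count % 2 == 0:
--         count -= 1
--     else:
--         count = 0
--     return "{0:b}".format(int(count))
-- ===== SOURCE B (Python) =====
-- def Cipher_Zeroes(N):
--     weight = {'0': 1, '6': 1, '9': 1, '8': 2}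
--     count = sum(weight.get(ch, 0) for ch in N)
--     if count == 0:
--         return "0"
--     count = count - 1 + 2 * (count % 2)  # branchless parity adjustment: odd -> +1, even -> -1
--     bits = ""
--     while count:
--         bits = str(count % 2) + bits
--         count //= 2
--     return bits
-- ===== Notes on version B (the rewrite author's own statement) =====
-- stated objective: alternative
-- what changed: Replaces A's branching accumulation loop with a weight-table (dict) sum, replaces the if/elif/else parity adjustment with the branchless formula count - 1 + 2*(count % 2), and builds the binary string back-to-front with a hand divmod loop instead of "{0:b}".format.
import Mathlib
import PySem

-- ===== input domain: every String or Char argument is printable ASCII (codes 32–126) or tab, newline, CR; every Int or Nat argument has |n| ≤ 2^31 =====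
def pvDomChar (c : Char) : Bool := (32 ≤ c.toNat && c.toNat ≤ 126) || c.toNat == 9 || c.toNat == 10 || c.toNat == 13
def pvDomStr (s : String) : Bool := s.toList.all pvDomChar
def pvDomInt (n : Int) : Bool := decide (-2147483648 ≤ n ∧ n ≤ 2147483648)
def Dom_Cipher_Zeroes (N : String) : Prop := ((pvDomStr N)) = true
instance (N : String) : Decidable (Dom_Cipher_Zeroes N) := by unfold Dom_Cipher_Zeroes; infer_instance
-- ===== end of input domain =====

-- B: table-driven weighted sum instead of A's branching loop, a branchless arithmetic parity
-- adjustment (count - 1 + 2*(count % 2)) instead of A's if/elif/else, and the binary string built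
-- back-to-front by a hand divmod loop instead of "{0:b}".format (alternative decomposition).

-- ===== PORT A =====
-- Hand port of Python's "{0:b}".format(n): '-' sign for negatives, most-significant bit first,
-- "0" for zero; exact for every int (A only reaches n ≥ 0 here).
def pyBits (n : Nat) : List Char :=
  if h : n = 0 then [] else pyBits (n / 2) ++ [if n % 2 = 1 then '1' else '0']
decreasing_by exact Nat.div_lt_self (Nat.pos_of_ne_zero h) (by decide)

def pyBinFmt (n : Int) : String :=
  if n < 0 then "-" ++ String.ofList (pyBits (-n).toNat)
  else if n = 0 then "0"
  else String.ofList (pyBits n.toNat)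

def Cipher_Zeroes (N : String) : String :=
  let lst := N.toList
  let count : Int :=
    lst.foldl (fun count i =>
      if i = '0' ∨ i = '6' ∨ i = '9' then count + 1
      else if i = '8' then count + 2
      else count) 0
  let count : Int :=
    if count > 0 ∧ PySem.Int.mod count 2 = 1 then count + 1
    else if count > 0 ∧ PySem.Int.mod count 2 = 0 then count - 1
    else 0
  pyBinFmt count

-- ===== PORT B =====
-- B's while loop: count is a nonnegative Python int there, so it runs on Nat ('//'/'%' on
-- nonnegative ints coincide with Nat division/mod; str(count % 2) is "0" or "1").
def bitsLoop (count : Nat) (bits : String) : String :=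
  if h : count = 0 then bits
  else bitsLoop (count / 2) ((if count % 2 = 1 then "1" else "0") ++ bits)
decreasing_by exact Nat.div_lt_self (Nat.pos_of_ne_zero h) (by decide)

def cipherWeight : PySem.Dict Char Int :=
  PySem.Dict.ofList [('0', 1), ('6', 1), ('9', 1), ('8', 2)]

def Cipher_Zeroes_alt (N : String) : String :=
  let count : Int := N.toList.foldl (fun acc ch => acc + cipherWeight.getD ch 0) 0
  if count = 0 then "0"
  else
    let count : Int := count - 1 + 2 * PySem.Int.mod count 2
    bitsLoop count.toNat ""

-- ===== PRECONDITION & SPEC =====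
def Spec_Cipher_Zeroes (N : String) (out : String) : Prop := out = Cipher_Zeroes_alt N
instance (N : String) (out : String) : Decidable (Spec_Cipher_Zeroes N out) := by unfold Spec_Cipher_Zeroes; infer_instance

-- ===== CLAIM (what is proved, stated in full; the proofs are below) =====
def Claim_equal_Cipher_Zeroes : Prop := ∀ (N : String), Dom_Cipher_Zeroes N → Spec_Cipher_Zeroes N (Cipher_Zeroes N)

-- ===== LEMMAS AND PROOFS =====

theorem cipherWeight_eq :
    cipherWeight = PySem.Dict.mk [('0', 1), ('6', 1), ('9', 1), ('8', 2)] := by decide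

-- B's table lookup, written out per character.
theorem one_str : ("1" : String) = String.ofList ['1'] := by decide
theorem zero_str : ("0" : String) = String.ofList ['0'] := by decide

theorem weight_lookup (ch : Char) :
    cipherWeight.getD ch 0 =
      if ch = '0' then 1 else if ch = '6' then 1 else if ch = '9' then 1
      else if ch = '8' then 2 else 0 := by
  by_cases h0 : ch = '0'
  · subst h0; decide
  by_cases h6 : ch = '6'
  · subst h6; decide
  by_cases h9 : ch = '9'
  · subst h9; decide
  by_cases h8 : ch = '8'
  · subst h8; decide
  rw [if_neg h0, if_neg h6, if_neg h9, if_neg h8]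
  simp only [cipherWeight_eq, PySem.Dict.getD, PySem.Dict.get?_mk_cons]
  simp [Ne.symm h0, Ne.symm h6, Ne.symm h9, Ne.symm h8, PySem.Dict.get?]

-- A's branching step equals B's table lookup (pointwise), hence the two folds agree.
theorem cipher_step_eq (c : Int) (ch : Char) :
    (if ch = '0' ∨ ch = '6' ∨ ch = '9' then c + 1
     else if ch = '8' then c + 2 else c)
    = c + cipherWeight.getD ch 0 := by
  rw [weight_lookup]
  by_cases h0 : ch = '0' <;> by_cases h6 : ch = '6' <;> by_cases h9 : ch = '9' <;>
    by_cases h8 : ch = '8' <;> simp_all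

theorem cipher_fold_eq (l : List Char) (c : Int) :
    l.foldl (fun count i =>
      if i = '0' ∨ i = '6' ∨ i = '9' then count + 1
      else if i = '8' then count + 2 else count) c
    = l.foldl (fun acc ch => acc + cipherWeight.getD ch 0) c := by
  induction l generalizing c with
  | nil => rfl
  | cons a l ih => simp only [List.foldl_cons, cipher_step_eq]

theorem cipher_fold_nonneg (l : List Char) (c : Int) (hc : 0 ≤ c) :
    0 ≤ l.foldl (fun acc ch => acc + cipherWeight.getD ch 0) c := by
  induction l generalizing c with
  | nil => exact hc
  | cons a l ih =>
    rw [List.foldl_cons]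
    refine ih _ ?_
    have : (0 : Int) ≤ cipherWeight.getD a 0 := by
      rw [weight_lookup]; split_ifs <;> norm_num
    omega

theorem bitsLoop_eq_pyBits (n : Nat) :
    ∀ bits, bitsLoop n bits = String.ofList (pyBits n) ++ bits := by
  induction n using Nat.strong_induction_on with
  | _ n ih =>
    intro bits
    rw [bitsLoop, pyBits]
    by_cases h : n = 0
    · simp [h]
    · rw [dif_neg h, dif_neg h, ih (n / 2) (Nat.div_lt_self (Nat.pos_of_ne_zero h) (by decide))]
      by_cases hp : n % 2 = 1
      · rw [if_pos hp, if_pos hp, one_str]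
        simp [String.append_assoc]
      · rw [if_neg hp, if_neg hp, zero_str]
        simp [String.append_assoc]

-- B's loop with empty accumulator is exactly A's binary formatter on positive ints.
theorem bitsLoop_eq_pyBinFmt (m : Int) (hm : 0 < m) :
    bitsLoop m.toNat "" = pyBinFmt m := by
  rw [bitsLoop_eq_pyBits, pyBinFmt, if_neg (by omega), if_neg (by omega)]
  simp

-- ===== VERDICT (by name: the statement is the Claim_ definition above) =====
theorem Cipher_Zeroes_spec : Claim_equal_Cipher_Zeroes := by
  intro N _
  unfold Spec_Cipher_Zeroes Cipher_Zeroes Cipher_Zeroes_alt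
  simp only [cipher_fold_eq]
  set c : Int := N.toList.foldl (fun acc ch => acc + cipherWeight.getD ch 0) 0 with hc
  have hnn : 0 ≤ c := cipher_fold_nonneg _ 0 le_rfl
  by_cases h0 : c = 0
  · simp [h0, pyBinFmt, PySem.Int.mod]
  · have hpos : 0 < c := lt_of_le_of_ne hnn (Ne.symm h0)
    have hmod : PySem.Int.mod c 2 = c % 2 := by
      unfold PySem.Int.mod
      rw [Int.fmod_eq_emod]
      norm_num
    rw [if_neg h0]
    by_cases hp : c % 2 = 1
    · rw [if_pos ⟨hpos, by rw [hmod, hp]⟩, ← bitsLoop_eq_pyBinFmt (c + 1) (by omega)]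
      congr 1
      omega
    · have hp0 : c % 2 = 0 := by omega
      rw [if_neg (by rw [hmod]; omega), if_pos ⟨hpos, by rw [hmod, hp0]⟩,
        ← bitsLoop_eq_pyBinFmt (c - 1) (by omega)]
      congr 1
      omega
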